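-- pv_equiv track=rewrite | github.com/daveflr/CryptoLabServer | app.py | xcrypt
-- ===== SOURCE A (Python) =====
-- xcrypt_code = {
--     'e': 'w',
--     'a': 'k',
--     'o': 'x',
--     's': 'ñ',
--     'r': 'j',
--     'n': 'z',
--     'i': 'f',
--     'd': 'h',
--     'l': 'q',
--     'c': 'y',
--     't': 'v',
--     'u': 'g',
--     'm': 'b'
-- }
--
-- def xcrypt(text):
--     counter = 0
--     list_str = list(text)
--     for letter in text:
--         space = 0
--         for key, value in xcrypt_code.items():
--             if letter == key or letter.upper() == key.upper():
--                 list_str[counter] = value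
--                 break
--             elif letter == value or letter.upper() == value.upper():
--                 list_str[counter] = key
--                 break
--             space += 1
--         counter += 1
--     return ''.join(list_str)
-- ===== SOURCE B (Python) =====
-- xcrypt_code = {
--     'e': 'w', 'a': 'k', 'o': 'x', 's': 'ñ', 'r': 'j', 'n': 'z', 'i': 'f',
--     'd': 'h', 'l': 'q', 'c': 'y', 't': 'v', 'u': 'g', 'm': 'b'
-- }
--
-- _table = {}
-- for _k, _v in xcrypt_code.items():
--     _table[_k] = _v
--     _table[_k.upper()] = _v
--     _table[_v] = _k
--     _table[_v.upper()] = _k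
--
--
-- def xcrypt(text):
--     return ''.join(_table.get(ch, ch) for ch in text)
-- ===== Notes on version B (the rewrite author's own statement) =====
-- stated objective: faster
-- what changed: B precomputes one flat translation table (key/KEY->value, value/VALUE->key) once and does a single pass with one dict lookup per character, replacing A's per-character linear scan over the 13 cipher pairs with case-folding comparisons and in-place list mutation.
import Mathlib
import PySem

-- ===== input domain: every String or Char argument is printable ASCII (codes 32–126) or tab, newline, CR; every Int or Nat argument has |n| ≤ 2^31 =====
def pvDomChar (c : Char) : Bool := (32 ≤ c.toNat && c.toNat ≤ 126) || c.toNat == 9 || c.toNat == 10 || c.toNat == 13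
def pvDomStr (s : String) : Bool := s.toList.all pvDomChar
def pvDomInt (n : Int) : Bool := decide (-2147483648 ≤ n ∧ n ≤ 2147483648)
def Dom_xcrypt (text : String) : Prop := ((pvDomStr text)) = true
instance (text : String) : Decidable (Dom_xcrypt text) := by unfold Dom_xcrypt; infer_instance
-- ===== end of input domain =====

-- B replaces A's per-character linear scan over the cipher pairs with one precomputed
-- flat translation table and a single hash lookup per character (idiomatic/faster by
-- a constant factor; return value only, no mutation in either version).

-- ===== PORT A =====
-- the module-level dict xcrypt_code, in its insertion order
def xcryptCode : List (Char × Char) :=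
  [('e','w'),('a','k'),('o','x'),('s','ñ'),('r','j'),('n','z'),('i','f'),
   ('d','h'),('l','q'),('c','y'),('t','v'),('u','g'),('m','b')]

-- the inner 'for key, value in xcrypt_code.items(): … break' loop.
-- Python's str.upper is ported by PySem.Chars.upperChar (ASCII-exact); Python uppercases
-- 'ñ' to 'Ñ' while upperChar leaves it, but no Dom character equals 'ñ' or 'Ñ', so on Dom
-- the comparisons agree with Python's.
def xcryptInner (letter : Char) (pairs : List (Char × Char)) (listStr : List Char) (counter : Nat) : List Char :=
  match pairs with
  | [] => listStr
  | (key, value) :: rest =>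
    if letter == key || PySem.Chars.upperChar letter == PySem.Chars.upperChar key then
      listStr.set counter value
    else if letter == value || PySem.Chars.upperChar letter == PySem.Chars.upperChar value then
      listStr.set counter key
    else xcryptInner letter rest listStr counter

-- the outer 'for letter in text' loop with its running counter over list_str
def xcryptOuter (letters : List Char) (listStr : List Char) (counter : Nat) : List Char :=
  match letters with
  | [] => listStr
  | c :: rest => xcryptOuter rest (xcryptInner c xcryptCode listStr counter) (counter + 1)

def xcrypt (text : String) : String :=
  String.mk (xcryptOuter text.toList text.toList 0)

-- ===== PORT B =====
-- the module-level flat table: key→value, KEY→value, value→key, VALUE→key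
-- (upperChar 'ñ' = 'ñ' here where Python adds key 'Ñ'; both keys are outside Dom, so
-- lookups on Dom characters agree with Python's table)
def xcryptTable : PySem.Dict Char Char :=
  xcryptCode.foldl
    (fun table kv =>
      ((((table.insert kv.1 kv.2).insert (PySem.Chars.upperChar kv.1) kv.2).insert
          kv.2 kv.1).insert (PySem.Chars.upperChar kv.2) kv.1))
    PySem.Dict.empty

def xcrypt_alt (text : String) : String :=
  String.mk (text.toList.map (fun ch => xcryptTable.getD ch ch))

-- ===== PRECONDITION & SPEC =====
def Spec_xcrypt (text : String) (out : String) : Prop := out = xcrypt_alt text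
instance (text : String) (out : String) : Decidable (Spec_xcrypt text out) := by unfold Spec_xcrypt; infer_instance

-- ===== CLAIM (what is proved, stated in full; the proofs are below) =====
def Claim_equal_xcrypt : Prop := ∀ (text : String), Dom_xcrypt text → Spec_xcrypt text (xcrypt text)

-- ===== LEMMAS AND PROOFS =====

-- the character A's inner scan would write at the current position (none = no match)
def xcryptFind (c : Char) (pairs : List (Char × Char)) : Option Char :=
  match pairs with
  | [] => none
  | (key, value) :: rest =>
    if c == key || PySem.Chars.upperChar c == PySem.Chars.upperChar key then some value
    else if c == value || PySem.Chars.upperChar c == PySem.Chars.upperChar value then some key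
    else xcryptFind c rest

theorem xcryptInner_eq_find (c : Char) (pairs : List (Char × Char)) (ls : List Char) (k : Nat) :
    xcryptInner c pairs ls k =
      match xcryptFind c pairs with
      | some r => ls.set k r
      | none => ls := by
  induction pairs with
  | nil => rfl
  | cons kv rest ih =>
    obtain ⟨key, value⟩ := kv
    simp only [xcryptInner, xcryptFind]
    split_ifs <;> simp [ih]

-- on every domain character, A's scan outcome is exactly B's table lookup
set_option maxRecDepth 4096 in
theorem char_eq (c : Char) (h : pvDomChar c = true) :
    (xcryptFind c xcryptCode).getD c = xcryptTable.getD c c := by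
  have key : ∀ n : Nat, n < 127 → pvDomChar (Char.ofNat n) = true →
      (xcryptFind (Char.ofNat n) xcryptCode).getD (Char.ofNat n) =
        xcryptTable.getD (Char.ofNat n) (Char.ofNat n) := by decide
  have hlt : c.toNat < 127 := by
    simp only [pvDomChar, Bool.or_eq_true, Bool.and_eq_true, decide_eq_true_eq, beq_iff_eq] at h
    omega
  have hh := key c.toNat hlt
  rw [Char.ofNat_toNat] at hh
  exact hh h

theorem set_self_of_getElem? (ls : List Char) (k : Nat) (c : Char) (h : ls[k]? = some c) :
    ls.set k c = ls := by
  obtain ⟨hk, hv⟩ := List.getElem?_eq_some_iff.mp h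
  apply List.ext_getElem?; intro i
  by_cases hi : i = k
  · subst hi; simp [hk, hv]
  · simp [Ne.symm hi]

theorem take_set_succ (ls : List Char) (k : Nat) (a : Char) (h : k < ls.length) :
    (ls.set k a).take (k+1) = ls.take k ++ [a] := by
  rw [List.take_add_one, List.take_set, List.set_eq_of_length_le (by simp)]
  simp [h]

theorem xcryptOuter_spec (letters ls : List Char) (k : Nat)
    (hdrop : ls.drop k = letters) (hdom : letters.all pvDomChar = true) :
    xcryptOuter letters ls k = ls.take k ++ letters.map (fun c => xcryptTable.getD c c) := by
  induction letters generalizing ls k with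
  | nil =>
    simp only [xcryptOuter, List.map_nil, List.append_nil]
    rw [List.take_of_length_le (List.drop_eq_nil_iff.mp hdrop)]
  | cons c rest ih =>
    simp only [List.all_cons, Bool.and_eq_true] at hdom
    have hget : ls[k]? = some c := by
      have h0 : (ls.drop k)[0]? = ls[k + 0]? := List.getElem?_drop
      rw [hdrop] at h0; simpa using h0.symm
    have hk : k < ls.length := (List.getElem?_eq_some_iff.mp hget).1
    have hstep : xcryptInner c xcryptCode ls k = ls.set k (xcryptTable.getD c c) := by
      rw [xcryptInner_eq_find]
      rcases hf : xcryptFind c xcryptCode with _ | r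
      · rw [← char_eq c hdom.1, hf]
        exact (set_self_of_getElem? ls k c hget).symm
      · rw [← char_eq c hdom.1, hf]; rfl
    have h1 : ls.drop (k+1) = rest := by
      have h2 := congrArg List.tail hdrop
      simpa [List.tail_drop] using h2
    have hdrop' : (ls.set k (xcryptTable.getD c c)).drop (k+1) = rest := by
      rw [List.drop_set]; simp [h1]
    simp only [xcryptOuter, hstep]
    rw [ih (ls.set k (xcryptTable.getD c c)) (k+1) hdrop' hdom.2]
    rw [take_set_succ ls k _ hk]
    simp

-- ===== VERDICT (by name: the statement is the Claim_ definition above) =====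
theorem xcrypt_spec : Claim_equal_xcrypt := by
  intro text hdom
  unfold Spec_xcrypt xcrypt xcrypt_alt
  rw [xcryptOuter_spec text.toList text.toList 0 (by simp) hdom]
  simp
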